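-- pv_equiv track=rewrite | github.com/Adrian-Garcia/Python-Algorithms | interviews/rooms.py | solution
-- ===== SOURCE A (Python) =====
-- def solution(A):
--
--   if not A:
--     return 0
--
--   mySet = set()
--   for element in A:
--     # It is sorted if it arrives A0 instad of 0A
--     deleteSign = sorted(element[1:len(element)])
--     room = ''.join(deleteSign)
--     mySet.add(room)
--
--   return len(mySet)
-- ===== SOURCE B (Python) =====
-- def solution(A):
--
--   if not A:
--     return 0
--
--   seen = []
--   for element in A:
--     # frequency signature of element[1:]; dict == ignores insertion order,
--     # so two tails that are anagrams get the same signature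
--     sig = {}
--     for ch in element[1:]:
--       sig[ch] = sig.get(ch, 0) + 1
--     if sig not in seen:
--       seen.append(sig)
--
--   return len(seen)
-- ===== Notes on version B (the rewrite author's own statement) =====
-- stated objective: alternative
-- what changed: Replaces A's canonical-by-sorting key (sorted tail joined to a string, collected in a set) with a canonical-by-counting key: a frequency dict of the tail, kept in a list of previously unseen signatures compared by order-insensitive dict equality; no sorting anywhere.
import Mathlib
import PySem

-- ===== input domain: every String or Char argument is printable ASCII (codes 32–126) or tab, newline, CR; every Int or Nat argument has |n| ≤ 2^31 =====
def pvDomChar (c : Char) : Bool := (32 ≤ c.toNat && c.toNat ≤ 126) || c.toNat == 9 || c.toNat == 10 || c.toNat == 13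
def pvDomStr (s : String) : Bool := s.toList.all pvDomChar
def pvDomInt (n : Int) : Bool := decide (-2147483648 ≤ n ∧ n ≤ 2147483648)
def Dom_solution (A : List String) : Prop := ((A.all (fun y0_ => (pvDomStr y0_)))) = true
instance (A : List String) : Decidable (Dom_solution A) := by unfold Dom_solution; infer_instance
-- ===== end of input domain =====

-- B counts distinct frequency signatures of the tails instead of A's distinct sorted-tail strings; no sorting anywhere (objective: alternative).

-- ===== PORT A =====
def solution (A : List String) : Int :=
  if A = [] then 0
  else
    let mySet : PySem.Set (List Char) := A.foldl (fun mySet element =>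
      -- deleteSign = sorted(element[1:len(element)])
      let deleteSign := PySem.List.sorted
        (PySem.List.slice element.toList (some 1) (some (PySem.Str.len element))) (fun x => x) false
      -- room = ''.join(deleteSign)
      let room := PySem.Chars.join [] (deleteSign.map (fun c => [c]))
      PySem.Set.add mySet room) PySem.Set.empty
    PySem.Set.len mySet

-- ===== PORT B =====
-- Python's dict == (order-insensitive): same number of keys, and every key of d maps to the same value in e
def pyDictEq (d e : PySem.Dict Char Int) : Bool :=
  d.size == e.size && d.keys.all (fun k => d.get? k == e.get? k)

def solution_alt (A : List String) : Int :=
  if A = [] then 0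
  else
    let seen : List (PySem.Dict Char Int) := A.foldl (fun seen element =>
      let sig := (PySem.List.slice element.toList (some 1) none).foldl
        (fun d ch => d.insert ch (d.getD ch 0 + 1)) PySem.Dict.empty
      -- 'sig not in seen' with Python's == on dicts
      if seen.any (fun d => pyDictEq sig d) then seen else seen ++ [sig]) []
    (seen.length : Int)

-- ===== PRECONDITION & SPEC =====
def Spec_solution (A : List String) (out : Int) : Prop := out = solution_alt A
instance (A : List String) (out : Int) : Decidable (Spec_solution A out) := by unfold Spec_solution; infer_instance

-- ===== CLAIM (what is proved, stated in full; the proofs are below) =====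
def Claim_equal_solution : Prop := ∀ (A : List String), Dom_solution A → Spec_solution A (solution A)

-- ===== LEMMAS AND PROOFS =====

theorem get?_counter (xs : List Char) (c : Char) :
    (PySem.Dict.counter xs).get? c = if c ∈ xs then some ((xs.count c : Int)) else none := by
  split_ifs with h
  · exact PySem.Dict.get?_of_mem_items _
      (by rw [PySem.Dict.items_counter]
          exact List.mem_map.2 ⟨c, (PySem.Set.mem_ofList xs c).2 h, rfl⟩)
      (PySem.Dict.nodup_keys_counter xs)
  · rw [PySem.Dict.get?_eq_none_iff_not_mem_keys, PySem.Dict.keys_counter]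
    exact fun hc => h ((PySem.Set.mem_ofList xs c).1 hc)

theorem size_counter (xs : List Char) :
    (PySem.Dict.counter xs).size = (PySem.Set.ofList xs).length := by
  show (PySem.Dict.counter xs).items.length = _
  rw [PySem.Dict.items_counter, List.length_map]

theorem ofList_length_eq_of_perm {xs ys : List Char} (h : xs.Perm ys) :
    (PySem.Set.ofList xs).length = (PySem.Set.ofList ys).length := by
  refine List.Perm.length_eq ?_
  rw [List.perm_ext_iff_of_nodup (PySem.Set.nodup_ofList xs) (PySem.Set.nodup_ofList ys)]
  intro a
  rw [PySem.Set.mem_ofList, PySem.Set.mem_ofList]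
  exact ⟨fun ha => h.mem_iff.1 ha, fun ha => h.mem_iff.2 ha⟩

theorem pyDictEq_counter (xs ys : List Char) :
    pyDictEq (PySem.Dict.counter xs) (PySem.Dict.counter ys) = true ↔ xs.Perm ys := by
  unfold pyDictEq
  rw [Bool.and_eq_true, beq_iff_eq, List.all_eq_true]
  constructor
  · rintro ⟨hsize, hvals⟩
    rw [List.perm_iff_count]
    intro c
    by_cases hc : c ∈ xs
    · have hk : c ∈ (PySem.Dict.counter xs).keys := by
        rw [PySem.Dict.keys_counter]; exact (PySem.Set.mem_ofList xs c).2 hc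
      have := hvals c hk
      rw [beq_iff_eq, get?_counter, get?_counter, if_pos hc] at this
      by_cases hcy : c ∈ ys
      · rw [if_pos hcy] at this
        exact_mod_cast Option.some.inj this
      · rw [if_neg hcy] at this; exact absurd this (by simp)
    · -- c ∉ xs: show c ∉ ys too, using that the key sets have equal size and xs-keys ⊆ ys-keys
      have hsub : ∀ a ∈ PySem.Set.ofList xs, a ∈ PySem.Set.ofList ys := by
        intro a ha
        have hk : a ∈ (PySem.Dict.counter xs).keys := by rw [PySem.Dict.keys_counter]; exact ha
        have := hvals a hk
        rw [beq_iff_eq, get?_counter, get?_counter,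
            if_pos ((PySem.Set.mem_ofList xs a).1 ha)] at this
        by_cases hay : a ∈ ys
        · exact (PySem.Set.mem_ofList ys a).2 hay
        · rw [if_neg hay] at this; exact absurd this (by simp)
      have hlen : (PySem.Set.ofList xs).length = (PySem.Set.ofList ys).length := by
        rw [size_counter, size_counter] at hsize; exact hsize
      have hsub' : ∀ a ∈ PySem.Set.ofList ys, a ∈ PySem.Set.ofList xs := by
        intro a ha
        have hperm : (PySem.Set.ofList xs).Perm (PySem.Set.ofList ys) :=
          (PySem.Set.ofList xs).perm_of_nodup_nodup_toFinset_eq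
            (PySem.Set.nodup_ofList xs) (PySem.Set.nodup_ofList ys)
            (Finset.eq_of_subset_of_card_le
              (fun b hb => List.mem_toFinset.2 (hsub b (List.mem_toFinset.1 hb)))
              (by rw [List.toFinset_card_of_nodup (PySem.Set.nodup_ofList ys),
                      List.toFinset_card_of_nodup (PySem.Set.nodup_ofList xs), hlen]))
        exact hperm.mem_iff.2 ha
      have hcy : c ∉ ys := fun hy =>
        hc ((PySem.Set.mem_ofList xs c).1 (hsub' c ((PySem.Set.mem_ofList ys c).2 hy)))
      rw [List.count_eq_zero_of_not_mem hc, List.count_eq_zero_of_not_mem hcy]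
  · intro hperm
    refine ⟨by rw [size_counter, size_counter]; exact ofList_length_eq_of_perm hperm, ?_⟩
    intro c hk
    have hc : c ∈ xs := by
      rw [PySem.Dict.keys_counter] at hk; exact (PySem.Set.mem_ofList xs c).1 hk
    rw [beq_iff_eq, get?_counter, get?_counter, if_pos hc, if_pos (hperm.mem_iff.1 hc)]
    have := List.perm_iff_count.1 hperm c
    rw [this]

-- the relation the two accumulators keep in step
def SigRel (k : List Char) (d : PySem.Dict Char Int) : Prop :=
  ∃ t : List Char, k = PySem.List.sorted t (fun x => x) false ∧ d = PySem.Dict.counter t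

theorem contains_eq_any {st : List (List Char)} {seen : List (PySem.Dict Char Int)}
    (h : List.Forall₂ SigRel st seen) (t : List Char) :
    PySem.Set.contains st (PySem.List.sorted t (fun x => x) false)
      = seen.any (fun d => pyDictEq (PySem.Dict.counter t) d) := by
  induction h with
  | nil => rfl
  | @cons k d st' seen' hkd _ ih =>
    obtain ⟨u, hk, hd⟩ := hkd
    have hhead : ((PySem.List.sorted t (fun x => x) false) == k)
        = pyDictEq (PySem.Dict.counter t) d := by
      subst hk hd
      by_cases hp : t.Perm u
      · rw [beq_iff_eq.2 ((PySem.List.sorted_id_eq_sorted_id_iff_perm t u).2 hp),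
            (pyDictEq_counter t u).2 hp]
      · rw [beq_eq_false_iff_ne.2
              (fun he => hp ((PySem.List.sorted_id_eq_sorted_id_iff_perm t u).1 he))]
        cases hq : pyDictEq (PySem.Dict.counter t) (PySem.Dict.counter u)
        · rfl
        · exact absurd ((pyDictEq_counter t u).1 hq) hp
    simp only [PySem.Set.contains, List.contains_cons, List.any_cons, hhead, ← ih]

theorem loop_eq (l : List String) (st : List (List Char)) (seen : List (PySem.Dict Char Int))
    (h : List.Forall₂ SigRel st seen) :
    PySem.Set.len (l.foldl (fun mySet element =>
        PySem.Set.add mySet (PySem.Chars.join []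
          ((PySem.List.sorted (PySem.List.slice element.toList (some 1) (some (PySem.Str.len element))) (fun x => x) false).map (fun c => [c])))) st)
      = ((l.foldl (fun seen element =>
          let sig := (PySem.List.slice element.toList (some 1) none).foldl
            (fun d ch => d.insert ch (d.getD ch 0 + 1)) PySem.Dict.empty
          if seen.any (fun d => pyDictEq sig d) then seen else seen ++ [sig]) seen).length : Int) := by
  induction l generalizing st seen with
  | nil =>
    simp only [List.foldl_nil]
    rw [show PySem.Set.len st = (st.length : Int) from rfl, h.length_eq]
  | cons e rest ih =>
    simp only [List.foldl_cons]
    have htail : PySem.List.slice e.toList (some 1) (some (PySem.Str.len e))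
        = PySem.List.slice e.toList (some 1) none := by
      have : PySem.Str.len e = (e.toList.length : Int) := by
        simp [PySem.Str.len_eq]
      rw [this]; simp [PySem.List.slice]
    set t := PySem.List.slice e.toList (some 1) none with ht
    have hsig : (PySem.List.slice e.toList (some 1) none).foldl
        (fun d ch => d.insert ch (d.getD ch 0 + 1)) PySem.Dict.empty = PySem.Dict.counter t :=
      PySem.Dict.foldl_insert_getD_add_one_eq_counter t
    rw [htail, PySem.Chars.join_nil_singletons, hsig]
    have hcont := contains_eq_any h t
    show PySem.Set.len (rest.foldl _ (PySem.Set.add st (PySem.List.sorted t (fun x => x) false))) = _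
    rw [PySem.Set.add, hcont]
    cases hq : (seen.any (fun d => pyDictEq (PySem.Dict.counter t) d)) with
    | true =>
      rw [if_pos rfl, if_pos rfl]
      exact ih _ _ h
    | false =>
      rw [if_neg Bool.false_ne_true, if_neg Bool.false_ne_true]
      exact ih _ _ (List.rel_append h (List.forall₂_cons.2 ⟨⟨t, rfl, rfl⟩, List.Forall₂.nil⟩))

-- ===== VERDICT (by name: the statement is the Claim_ definition above) =====
theorem solution_spec : Claim_equal_solution := by
  intro A _
  show solution A = solution_alt A
  unfold solution solution_alt
  by_cases hA : A = []
  · rw [if_pos hA, if_pos hA]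
  · rw [if_neg hA, if_neg hA]
    exact loop_eq A [] [] List.Forall₂.nil
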